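-- pv_equiv track=rewrite | github.com/gabriel-p-artcls/23-08_UCC | 1_code/OLD/2_UCC_id_assign.py | assign_fname
-- ===== SOURCE A (Python) =====
-- def assign_fname(all_names):
--     """
--     Assign names used for files and urls
--     """
--     all_names_reorder, all_fnames_reorder = [], []
--     for names in all_names:
--         names = names.split(';')
--         fnames_temp = []
--         for i, name in enumerate(names):
--             name = name.strip()
--             # We replace '+' with 'p' to avoid duplicating names for clusters
--             # like 'Juchert J0644.8-0925' and 'Juchert_J0644.8+0925'
--             name = name.lower().replace('_', '').replace(' ', '').replace(
--                 '-', '').replace('.', '').replace("'", '').replace('+', 'p')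
--             fnames_temp.append(name)
--
--         names_reorder, fnames_reorder = preferred_names(names, fnames_temp)
--
--         all_names_reorder.append(";".join(names_reorder))
--         # all_fnames_reorder.append(";".join(fnames_reorder))
--         all_fnames_reorder.append(';'.join(list(dict.fromkeys(fnames_reorder))))
--
--     return all_names_reorder, all_fnames_reorder
--
-- def preferred_names(names, fnames):
--     """
--     Use naming conventions according to this list of preferred names
--     """
--     names_lst = (
--         'blanco', 'westerlund', 'ngc', 'melotte', 'trumpler', 'ruprecht',
--         'berkeley', 'pismis', 'vdbh', 'loden', 'kronberger', 'collinder',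
--         'haffner', 'tombaugh', 'dolidze', 'auner', 'waterloo', 'basel',
--         'bochum', 'hogg', 'carraro', 'lynga', 'johansson', 'mamajek',
--         'platais', 'harvard', 'czernik', 'koposov', 'eso', 'ascc', 'teutsch',
--         'alessi', 'king', 'saurer', 'fsr', 'juchert', 'antalova', 'stephenson')
--
--     # Replace with another name according to the preference list
--     if len(names) == 1:
--         return names, fnames
--
--     # Always move 'MWSC to the last position'
--     if "mwsc" in fnames[0]:
--         names = names[1:] + [names[0]]
--         fnames = fnames[1:] + [fnames[0]]
--
--     # # Select the first name listed
--     def find_preferred_name(fnames):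
--         """Replace with another name according to the preference list"""
--         for name_prefer in names_lst:
--             for i, name in enumerate(fnames):
--                 if name_prefer in name:
--                     return i
--         return None
--
--     def reorder_names(nms_lst, i):
--         nms_reorder = list(nms_lst)
--         name0 = nms_reorder[i]
--         del nms_reorder[i]
--         nms_reorder = [name0] + nms_reorder
--         return nms_reorder
--
--     i = find_preferred_name(fnames)
--     if i is not None:
--         # Reorder
--         names_reorder = reorder_names(names, i)
--         fnames_reorder = reorder_names(fnames, i)
--     else:
--         names_reorder, fnames_reorder = names, fnames
--
--     return names_reorder, fnames_reorder
-- ===== SOURCE B (Python) =====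
-- NAMES_LST = (
--     'blanco', 'westerlund', 'ngc', 'melotte', 'trumpler', 'ruprecht',
--     'berkeley', 'pismis', 'vdbh', 'loden', 'kronberger', 'collinder',
--     'haffner', 'tombaugh', 'dolidze', 'auner', 'waterloo', 'basel',
--     'bochum', 'hogg', 'carraro', 'lynga', 'johansson', 'mamajek',
--     'platais', 'harvard', 'czernik', 'koposov', 'eso', 'ascc', 'teutsch',
--     'alessi', 'king', 'saurer', 'fsr', 'juchert', 'antalova', 'stephenson')
--
-- _TABLE = str.maketrans({'_': None, ' ': None, '-': None, '.': None,
--                         "'": None, '+': 'p'})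
--
--
-- def _norm(name):
--     """Normalize one name with a single translation pass."""
--     return name.strip().lower().translate(_TABLE)
--
--
-- def _rank(fname):
--     """Smallest index in NAMES_LST whose entry occurs in fname, else None."""
--     for j, pref in enumerate(NAMES_LST):
--         if pref in fname:
--             return j
--     return None
--
--
-- def _reorder(nms, i):
--     """Move element i to the front, by slicing."""
--     return nms[i:i + 1] + nms[:i] + nms[i + 1:]
--
--
-- def _process(names_str):
--     names = names_str.split(';')
--     fnames = [_norm(nm) for nm in names]
--
--     if len(names) != 1:
--         # Always move 'MWSC' to the last position
--         if 'mwsc' in fnames[0]: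
--             names = names[1:] + [names[0]]
--             fnames = fnames[1:] + [fnames[0]]
--
--         # argmin over (rank, position): best preference first, earliest wins
--         best = None  # (rank, index) of the best candidate so far
--         for i, fn in enumerate(fnames):
--             r = _rank(fn)
--             if r is not None and (best is None or r < best[0]):
--                 best = (r, i)
--         if best is not None:
--             i = best[1]
--             names = _reorder(names, i)
--             fnames = _reorder(fnames, i)
--
--     return ';'.join(names), ';'.join(dict.fromkeys(fnames))
--
--
-- def assign_fname(all_names):
--     """
--     Assign names used for files and urls
--     """
--     pairs = [_process(names) for names in all_names]
--     return [p[0] for p in pairs], [p[1] for p in pairs]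
-- ===== Notes on version B (the rewrite author's own statement) =====
-- stated objective: alternative
-- what changed: The preference-major nested scan of find_preferred_name is replaced by a per-name rank (first matching preference index) with a single argmin pass tie-broken by position, the six chained str.replace calls by one str.translate table pass, reorder_names' copy/del by slicing, and the accumulator loop over all_names by a comprehension.
import Mathlib
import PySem

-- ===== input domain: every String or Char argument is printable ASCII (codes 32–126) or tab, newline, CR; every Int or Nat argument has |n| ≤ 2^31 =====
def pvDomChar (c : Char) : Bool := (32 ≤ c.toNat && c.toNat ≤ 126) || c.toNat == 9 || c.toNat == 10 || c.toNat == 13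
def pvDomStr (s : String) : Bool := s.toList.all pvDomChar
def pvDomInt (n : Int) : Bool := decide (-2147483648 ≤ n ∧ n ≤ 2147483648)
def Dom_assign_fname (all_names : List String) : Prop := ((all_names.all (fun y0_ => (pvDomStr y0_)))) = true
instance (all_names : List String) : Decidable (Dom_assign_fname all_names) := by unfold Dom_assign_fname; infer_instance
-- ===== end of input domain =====

-- B replaces A's preference-major nested scan by a per-name rank/argmin pass and the
-- chained replaces by one per-character translation pass; objective: alternative (same cost).

def pvPrefsList : List String :=
  ["blanco", "westerlund", "ngc", "melotte", "trumpler", "ruprecht",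
   "berkeley", "pismis", "vdbh", "loden", "kronberger", "collinder",
   "haffner", "tombaugh", "dolidze", "auner", "waterloo", "basel",
   "bochum", "hogg", "carraro", "lynga", "johansson", "mamajek",
   "platais", "harvard", "czernik", "koposov", "eso", "ascc", "teutsch",
   "alessi", "king", "saurer", "fsr", "juchert", "antalova", "stephenson"]

-- ===== PORT A =====
-- name.strip(); name.lower().replace('_','').replace(' ','').replace('-','').replace('.','').replace("'",'').replace('+','p')
def pvNormA (name : String) : String :=
  let name := PySem.Str.strip name
  PySem.Str.replace (PySem.Str.replace (PySem.Str.replace (PySem.Str.replace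
    (PySem.Str.replace (PySem.Str.replace (PySem.Str.lower name)
      "_" "") " " "") "-" "") "." "") "'" "") "+" "p"

-- inner loop of find_preferred_name: 'for i, name in enumerate(fnames): if name_prefer in name: return i'
def pvFindIdxA (pref : String) (fnames : List String) (i : Nat) : Option Nat :=
  match fnames with
  | [] => none
  | fn :: rest => if PySem.Str.isIn pref fn then some i else pvFindIdxA pref rest (i + 1)

-- outer loop of find_preferred_name over names_lst
def pvFindPrefA (prefs : List String) (fnames : List String) : Option Nat :=
  match prefs with
  | [] => none
  | p :: ps =>
    match pvFindIdxA p fnames 0 with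
    | some i => some i
    | none => pvFindPrefA ps fnames

-- reorder_names: name0 = nms[i]; del nms[i]; [name0] + rest  (i is always in range when called)
def pvReorderA (nms : List String) (i : Nat) : List String :=
  match PySem.List.pop? nms (i : Int) with
  | some (name0, rest) => name0 :: rest
  | none => nms  -- unreachable totality guard (Python would raise IndexError)

def pvPreferredA (names fnames : List String) : List String × List String :=
  if names.length = 1 then (names, fnames)
  else
    let moved :=
      if PySem.Str.isIn "mwsc" (PySem.List.pyGetD fnames 0 "") then
        (PySem.List.slice names (some 1) none ++ [PySem.List.pyGetD names 0 ""],
         PySem.List.slice fnames (some 1) none ++ [PySem.List.pyGetD fnames 0 ""])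
      else (names, fnames)
    match pvFindPrefA pvPrefsList moved.2 with
    | some i => (pvReorderA moved.1 i, pvReorderA moved.2 i)
    | none => (moved.1, moved.2)

def assign_fname (all_names : List String) : List String × List String :=
  all_names.foldl
    (fun (acc : List String × List String) names =>
      let namesL := (PySem.Str.split? names ";").getD []
      let fnamesTemp := namesL.foldl (fun a nm => a ++ [pvNormA nm]) []
      let res := pvPreferredA namesL fnamesTemp
      (acc.1 ++ [PySem.Str.join ";" res.1],
       acc.2 ++ [PySem.Str.join ";" (PySem.List.dedup res.2)]))
    ([], [])

-- ===== PORT B =====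
-- the translation table applied to each character of the stripped+lowered name
def pvTbl (c : Char) : Option Char :=
  if c = '_' ∨ c = ' ' ∨ c = '-' ∨ c = '.' ∨ c = '\'' then none
  else if c = '+' then some 'p' else some c

def pvNormB (name : String) : String :=
  String.ofList ((PySem.Str.lower (PySem.Str.strip name)).toList.filterMap pvTbl)

-- _rank: first index in the preference list whose entry occurs in fname
def pvRankB (prefs : List String) (j : Nat) (fname : String) : Option Nat :=
  match prefs with
  | [] => none
  | p :: ps => if PySem.Str.isIn p fname then some j else pvRankB ps (j + 1) fname

-- the argmin loop over enumerate(fnames), best = (rank, index)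
def pvBestB (prefs : List String) (fnames : List String) (i : Nat)
    (best : Option (Nat × Nat)) : Option (Nat × Nat) :=
  match fnames with
  | [] => best
  | fn :: rest =>
    let best' :=
      match pvRankB prefs 0 fn, best with
      | some r, none => some (r, i)
      | some r, some (br, bi) => if r < br then some (r, i) else some (br, bi)
      | none, b => b
    pvBestB prefs rest (i + 1) best'

-- _reorder: nms[i:i+1] + nms[:i] + nms[i+1:]
def pvReorderB (nms : List String) (i : Nat) : List String :=
  PySem.List.slice nms (some (i : Int)) (some ((i : Int) + 1)) ++
  PySem.List.slice nms none (some (i : Int)) ++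
  PySem.List.slice nms (some ((i : Int) + 1)) none

def pvProcessB (namesStr : String) : String × String :=
  let names := (PySem.Str.split? namesStr ";").getD []
  let fnames := names.map pvNormB
  let res :=
    if names.length ≠ 1 then
      let moved :=
        if PySem.Str.isIn "mwsc" (PySem.List.pyGetD fnames 0 "") then
          (PySem.List.slice names (some 1) none ++ [PySem.List.pyGetD names 0 ""],
           PySem.List.slice fnames (some 1) none ++ [PySem.List.pyGetD fnames 0 ""])
        else (names, fnames)
      match (pvBestB pvPrefsList moved.2 0 none).map (·.2) with
      | some i => (pvReorderB moved.1 i, pvReorderB moved.2 i)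
      | none => (moved.1, moved.2)
    else (names, fnames)
  (PySem.Str.join ";" res.1, PySem.Str.join ";" (PySem.List.dedup res.2))

def assign_fname_alt (all_names : List String) : List String × List String :=
  let pairs := all_names.map pvProcessB
  (pairs.map (·.1), pairs.map (·.2))

-- ===== PRECONDITION & SPEC =====
def Spec_assign_fname (all_names : List String) (out : List String × List String) : Prop := out = assign_fname_alt all_names
instance (all_names : List String) (out : List String × List String) : Decidable (Spec_assign_fname all_names out) := by unfold Spec_assign_fname; infer_instance

-- ===== CLAIM (what is proved, stated in full; the proofs are below) =====
def Claim_equal_assign_fname : Prop := ∀ (all_names : List String), Dom_assign_fname all_names → Spec_assign_fname all_names (assign_fname all_names)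

-- ===== LEMMAS AND PROOFS =====

-- single-character replace is a flatMap
theorem pv_replace_go_single (c0 : Char) (new : List Char) :
    ∀ (l : List Char) (fuel : Nat) (acc : List Char), l.length ≤ fuel →
      PySem.Chars.replace.go [c0] new fuel l acc =
        acc.reverse ++ l.flatMap (fun c => if c = c0 then new else [c]) := by
  intro l
  induction l with
  | nil => intro fuel acc h; cases fuel <;> simp [PySem.Chars.replace.go]
  | cons c t ih =>
    intro fuel acc h
    cases fuel with
    | zero => simp at h
    | succ f =>
      simp only [PySem.Chars.replace.go]
      by_cases hc : c = c0
      · subst hc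
        have hp : [c].isPrefixOf (c :: t) = true := by simp [List.isPrefixOf]
        rw [if_pos hp]
        simp only [List.length_singleton, List.drop_succ_cons, List.drop_zero]
        rw [ih f (new.reverse ++ acc) (by simpa using h)]
        simp
      · have hp : [c0].isPrefixOf (c :: t) = false := by
          simp [List.isPrefixOf, Ne.symm hc]
        rw [if_neg (by simp [hp])]
        rw [ih f (c :: acc) (by simpa using h)]
        simp [hc]

theorem pv_replace_single (c0 : Char) (new : List Char) (l : List Char) :
    PySem.Chars.replace l [c0] new = l.flatMap (fun c => if c = c0 then new else [c]) := by
  rw [PySem.Chars.replace]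
  simp only [List.isEmpty_cons, Bool.false_eq_true, if_false]
  exact pv_replace_go_single c0 new l l.length [] le_rfl

theorem pv_chain (l : List Char) :
    ((((((l.flatMap (fun c => if c = '_' then [] else [c])).flatMap
        (fun c => if c = ' ' then [] else [c])).flatMap
        (fun c => if c = '-' then [] else [c])).flatMap
        (fun c => if c = '.' then [] else [c])).flatMap
        (fun c => if c = '\'' then [] else [c])).flatMap
        (fun c => if c = '+' then ['p'] else [c])) = l.filterMap pvTbl := by
  induction l with
  | nil => simp
  | cons c l ih =>
    simp only [List.flatMap_cons, List.flatMap_append, ih, List.filterMap_cons]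
    by_cases h1 : c = '_'; · simp [pvTbl, h1]
    by_cases h2 : c = ' '; · simp [pvTbl, h2]
    by_cases h3 : c = '-'; · simp [pvTbl, h3]
    by_cases h4 : c = '.'; · simp [pvTbl, h4]
    by_cases h5 : c = '\''; · simp [pvTbl, h5]
    by_cases h6 : c = '+'; · simp [pvTbl, h6]
    simp [pvTbl, h1, h2, h3, h4, h5, h6]

theorem pv_norm_eq (name : String) : pvNormA name = pvNormB name := by
  rw [← String.toList_inj]
  simp only [pvNormA, pvNormB, PySem.Str.toList_replace, String.toList_ofList]
  have e1 : ("_" : String).toList = ['_'] := rfl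
  have e2 : (" " : String).toList = [' '] := rfl
  have e3 : ("-" : String).toList = ['-'] := rfl
  have e4 : ("." : String).toList = ['.'] := rfl
  have e5 : ("'" : String).toList = ['\''] := rfl
  have e6 : ("+" : String).toList = ['+'] := rfl
  have e7 : ("p" : String).toList = ['p'] := rfl
  have e0 : ("" : String).toList = [] := rfl
  rw [e1, e2, e3, e4, e5, e6, e7, e0]
  simp only [pv_replace_single]
  exact pv_chain _

theorem pv_rank_shift (ps : List String) (fn : String) : ∀ j,
    pvRankB ps (j + 1) fn = (pvRankB ps j fn).map (· + 1) := by
  induction ps with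
  | nil => intro j; simp [pvRankB]
  | cons p ps ih =>
    intro j
    simp only [pvRankB]
    by_cases hp : PySem.Str.isIn p fn = true
    · rw [if_pos hp, if_pos hp]; simp
    · rw [if_neg hp, if_neg hp, ih (j+1), ih j]

theorem pv_best_keep_zero (prefs : List String) (bi : Nat) :
    ∀ (fnames : List String) (i : Nat), pvBestB prefs fnames i (some (0, bi)) = some (0, bi) := by
  intro fnames
  induction fnames with
  | nil => intro i; simp [pvBestB]
  | cons fn rest ih =>
    intro i
    simp only [pvBestB]
    cases h : pvRankB prefs 0 fn <;> simp [ih]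

theorem pv_best_nil (fnames : List String) : ∀ i b, pvBestB [] fnames i b = b := by
  induction fnames with
  | nil => intro i b; simp [pvBestB]
  | cons fn rest ih => intro i b; simp [pvBestB, pvRankB, ih]

theorem pv_findIdx_none (p : String) (fnames : List String) : ∀ i0,
    pvFindIdxA p fnames i0 = none → ∀ fn ∈ fnames, PySem.Str.isIn p fn = false := by
  induction fnames with
  | nil => simp
  | cons fn rest ih =>
    intro i0 h g hg
    simp only [pvFindIdxA] at h
    by_cases hp : PySem.Str.isIn p fn = true
    · rw [if_pos hp] at h; simp at h
    · rw [if_neg hp] at h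
      rcases List.mem_cons.mp hg with rfl | hg
      · simpa using hp
      · exact ih (i0+1) h g hg

theorem pv_L1 (p : String) (ps : List String) :
    ∀ (fnames : List String) (i0 k : Nat) (best0 : Option (Nat × Nat)),
      pvFindIdxA p fnames i0 = some k →
      (best0 = none ∨ ∃ br bi, best0 = some (br, bi) ∧ 1 ≤ br) →
      pvBestB (p :: ps) fnames i0 best0 = some (0, k) := by
  intro fnames
  induction fnames with
  | nil => intro i0 k b h _; simp [pvFindIdxA] at h
  | cons fn rest ih =>
    intro i0 k b h hb
    simp only [pvFindIdxA] at h
    simp only [pvBestB]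
    by_cases hp : PySem.Str.isIn p fn = true
    · rw [if_pos hp] at h
      obtain rfl : i0 = k := Option.some.inj h
      have hr : pvRankB (p :: ps) 0 fn = some 0 := by
        simp only [pvRankB]; rw [if_pos hp]
      rcases hb with rfl | ⟨br, bi, rfl, hbr⟩
      · simp only [hr]; exact pv_best_keep_zero _ _ _ _
      · simp only [hr]
        have : (0:Nat) < br := hbr
        simp only [if_pos this]
        exact pv_best_keep_zero _ _ _ _
    · rw [if_neg hp] at h
      have hr : pvRankB (p :: ps) 0 fn = (pvRankB ps 0 fn).map (· + 1) := by
        simp only [pvRankB]; rw [if_neg hp]; exact pv_rank_shift ps fn 0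
      apply ih (i0+1) k _ h
      cases hrk : pvRankB ps 0 fn with
      | none => simpa [hr, hrk] using hb
      | some r =>
        rcases hb with rfl | ⟨br, bi, rfl, hbr⟩
        · right; exact ⟨r+1, i0, by simp [hr, hrk], by omega⟩
        · by_cases hlt : r + 1 < br
          · right; exact ⟨r+1, i0, by simp [hr, hrk, hlt], by omega⟩
          · right; exact ⟨br, bi, by simp [hr, hrk, hlt], hbr⟩

theorem pv_L2 (p : String) (ps : List String) (fnames : List String)
    (hno : ∀ fn ∈ fnames, PySem.Str.isIn p fn = false) :
    ∀ (i0 : Nat) (b : Option (Nat × Nat)),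
      pvBestB (p :: ps) fnames i0 (b.map (fun q => (q.1 + 1, q.2))) =
        (pvBestB ps fnames i0 b).map (fun q => (q.1 + 1, q.2)) := by
  induction fnames with
  | nil => intro i0 b; simp [pvBestB]
  | cons fn rest ih =>
    intro i0 b
    have hfn := hno fn (by simp)
    have hrest : ∀ g ∈ rest, PySem.Str.isIn p g = false := fun g hg => hno g (by simp [hg])
    simp only [pvBestB]
    have hr : pvRankB (p :: ps) 0 fn = (pvRankB ps 0 fn).map (· + 1) := by
      simp only [pvRankB]; rw [if_neg (by rw [PySem.Str.isIn_eq] at hfn; simp [hfn])]; exact pv_rank_shift ps fn 0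
    cases hrk : pvRankB ps 0 fn with
    | none =>
      simp only [hr, hrk, Option.map_none]
      exact ih hrest (i0+1) b
    | some r =>
      cases b with
      | none =>
        simp only [hr, hrk, Option.map_none, Option.map_some]
        have := ih hrest (i0+1) (some (r, i0))
        simpa using this
      | some q =>
        obtain ⟨br, bi⟩ := q
        simp only [hr, hrk, Option.map_some]
        by_cases hlt : r < br
        · have h2 : r + 1 < br + 1 := by omega
          simp only [if_pos hlt, if_pos h2]
          simpa using ih hrest (i0+1) (some (r, i0))
        · have h2 : ¬ (r + 1 < br + 1) := by omega
          simp only [if_neg hlt, if_neg h2]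
          simpa using ih hrest (i0+1) (some (br, bi))

theorem pv_select_eq (prefs : List String) (fnames : List String) :
    pvFindPrefA prefs fnames = (pvBestB prefs fnames 0 none).map (·.2) := by
  induction prefs with
  | nil => simp [pvFindPrefA, pv_best_nil]
  | cons p ps ih =>
    simp only [pvFindPrefA]
    cases h : pvFindIdxA p fnames 0 with
    | some k => rw [pv_L1 p ps fnames 0 k none h (Or.inl rfl)]; simp
    | none =>
      have hno := pv_findIdx_none p fnames 0 h
      have := pv_L2 p ps fnames hno 0 none
      simp only [Option.map_none] at this
      rw [this, ih]
      cases pvBestB ps fnames 0 none <;> simp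

theorem pv_findIdx_bound (p : String) (fnames : List String) : ∀ (i0 k : Nat),
    pvFindIdxA p fnames i0 = some k → i0 ≤ k ∧ k < i0 + fnames.length := by
  induction fnames with
  | nil => intro i0 k h; simp [pvFindIdxA] at h
  | cons fn rest ih =>
    intro i0 k h
    simp only [pvFindIdxA] at h
    by_cases hp : PySem.Str.isIn p fn = true
    · rw [if_pos hp] at h
      obtain rfl : i0 = k := Option.some.inj h
      simp
    · rw [if_neg hp] at h
      have := ih (i0 + 1) k h
      constructor <;> [omega; (simp only [List.length_cons]; omega)]

theorem pv_findPref_lt (prefs fnames : List String) (i : Nat)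
    (h : pvFindPrefA prefs fnames = some i) : i < fnames.length := by
  induction prefs with
  | nil => simp [pvFindPrefA] at h
  | cons p ps ih =>
    simp only [pvFindPrefA] at h
    cases hf : pvFindIdxA p fnames 0 with
    | some k =>
      rw [hf] at h
      obtain rfl : k = i := Option.some.inj h
      have := pv_findIdx_bound p fnames 0 k hf
      omega
    | none => rw [hf] at h; exact ih h

theorem pv_reorder_eq (nms : List String) (i : Nat) (h : i < nms.length) :
    pvReorderA nms i = pvReorderB nms i := by
  unfold pvReorderA pvReorderB
  rw [PySem.List.pop?_natCast nms i h]
  have h1 : ((i : Int) + 1) = (((i + 1 : Nat) : Int)) := by push_cast; ring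
  rw [h1, PySem.List.slice_natCast, PySem.List.slice_to_natCast,
    PySem.List.slice_from_natCast]
  have h2 : i + 1 - i = 1 := by omega
  rw [h2]
  simp only [List.eraseIdx_eq_take_drop_succ]
  rw [List.drop_eq_getElem_cons h]
  rw [show (1:Nat) = 0 + 1 from rfl, List.take_succ_cons, List.take_zero]
  rfl

theorem pv_core_eq (ns fs : List String) (hlen : ns.length = fs.length) :
    (match pvFindPrefA pvPrefsList fs with
     | some i => (pvReorderA ns i, pvReorderA fs i)
     | none => (ns, fs)) =
    (match (pvBestB pvPrefsList fs 0 none).map (·.2) with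
     | some i => (pvReorderB ns i, pvReorderB fs i)
     | none => (ns, fs)) := by
  rw [← pv_select_eq]
  cases hf : pvFindPrefA pvPrefsList fs with
  | none => rfl
  | some i =>
    have hi2 : i < fs.length := pv_findPref_lt _ _ _ hf
    show (pvReorderA ns i, pvReorderA fs i) = (pvReorderB ns i, pvReorderB fs i)
    rw [pv_reorder_eq _ _ (by omega), pv_reorder_eq _ _ hi2]

theorem pv_preferred_eq (names fnames : List String) (hlen : names.length = fnames.length) :
    pvPreferredA names fnames =
      (if names.length ≠ 1 then
        let moved :=
          if PySem.Str.isIn "mwsc" (PySem.List.pyGetD fnames 0 "") then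
            (PySem.List.slice names (some 1) none ++ [PySem.List.pyGetD names 0 ""],
             PySem.List.slice fnames (some 1) none ++ [PySem.List.pyGetD fnames 0 ""])
          else (names, fnames)
        match (pvBestB pvPrefsList moved.2 0 none).map (·.2) with
        | some i => (pvReorderB moved.1 i, pvReorderB moved.2 i)
        | none => (moved.1, moved.2)
      else (names, fnames)) := by
  unfold pvPreferredA
  by_cases h1 : names.length = 1
  · rw [if_pos h1, if_neg (by omega)]
  · rw [if_neg h1, if_pos (show names.length ≠ 1 from h1)]
    by_cases h2 : PySem.Str.isIn "mwsc" (PySem.List.pyGetD fnames 0 "") = true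
    · simp only [if_pos h2]
      exact pv_core_eq _ _ (by simp [PySem.List.slice_from_one, hlen])
    · simp only [if_neg h2]
      exact pv_core_eq _ _ hlen

theorem pv_elem_eq (names : String) :
    (let namesL := (PySem.Str.split? names ";").getD []
     let fnamesTemp := namesL.foldl (fun a nm => a ++ [pvNormA nm]) []
     let res := pvPreferredA namesL fnamesTemp
     (PySem.Str.join ";" res.1, PySem.Str.join ";" (PySem.List.dedup res.2))) =
    pvProcessB names := by
  unfold pvProcessB
  simp only [PySem.List.foldl_append_singleton_eq_map, List.nil_append, pv_norm_eq]
  rw [pv_preferred_eq _ _ (by simp)]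

theorem pv_assign_loop (l : List String) : ∀ (acc : List String × List String),
    l.foldl
      (fun (acc : List String × List String) names =>
        let namesL := (PySem.Str.split? names ";").getD []
        let fnamesTemp := namesL.foldl (fun a nm => a ++ [pvNormA nm]) []
        let res := pvPreferredA namesL fnamesTemp
        (acc.1 ++ [PySem.Str.join ";" res.1],
         acc.2 ++ [PySem.Str.join ";" (PySem.List.dedup res.2)])) acc =
    (acc.1 ++ (l.map pvProcessB).map (·.1), acc.2 ++ (l.map pvProcessB).map (·.2)) := by
  induction l with
  | nil => intro acc; simp
  | cons s rest ih =>
    intro acc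
    rw [List.foldl_cons, ih]
    have he := pv_elem_eq s
    simp only at he
    simp [← he]

-- ===== VERDICT (by name: the statement is the Claim_ definition above) =====
theorem assign_fname_spec : Claim_equal_assign_fname := by
  intro all_names _dom
  unfold Spec_assign_fname assign_fname assign_fname_alt
  rw [pv_assign_loop all_names ([], [])]
  simp
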